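-- pv_equiv track=rewrite | github.com/HarshaVippala/ResumeForge | backend/services/enhanced_job_scraper.py | _is_us_location
-- ===== SOURCE A (Python) =====
-- def _is_us_location(location: str) -> bool:
--     """Check if location is in the US"""
--     if not location:
--         return False
--
--     us_indicators = [
--         'united states', 'usa', 'u.s.', 'us',
--         ', al', ', ak', ', az', ', ar', ', ca', ', co', ', ct', ', de', ', fl', ', ga',
--         ', hi', ', id', ', il', ', in', ', ia', ', ks', ', ky', ', la', ', me', ', md',
--         ', ma', ', mi', ', mn', ', ms', ', mo', ', mt', ', ne', ', nv', ', nh', ', nj',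
--         ', nm', ', ny', ', nc', ', nd', ', oh', ', ok', ', or', ', pa', ', ri', ', sc',
--         ', sd', ', tn', ', tx', ', ut', ', vt', ', va', ', wa', ', wv', ', wi', ', wy',
--         'new york', 'san francisco', 'los angeles', 'chicago', 'boston', 'seattle',
--         'austin', 'denver', 'atlanta', 'miami', 'dallas', 'houston', 'phoenix'
--     ]
--
--     location_lower = location.lower()
--     return any(indicator in location_lower for indicator in us_indicators)
-- ===== SOURCE B (Python) =====
-- _STATES = frozenset((
--     'al', 'ak', 'az', 'ar', 'ca', 'co', 'ct', 'de', 'fl', 'ga',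
--     'hi', 'id', 'il', 'in', 'ia', 'ks', 'ky', 'la', 'me', 'md',
--     'ma', 'mi', 'mn', 'ms', 'mo', 'mt', 'ne', 'nv', 'nh', 'nj',
--     'nm', 'ny', 'nc', 'nd', 'oh', 'ok', 'or', 'pa', 'ri', 'sc',
--     'sd', 'tn', 'tx', 'ut', 'vt', 'va', 'wa', 'wv', 'wi', 'wy'))
--
-- _TERMS = ('united states', 'usa', 'u.s.', 'us',
--           'new york', 'san francisco', 'los angeles', 'chicago', 'boston',
--           'seattle', 'austin', 'denver', 'atlanta', 'miami', 'dallas',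
--           'houston', 'phoenix')
--
--
-- def _is_us_location(location: str) -> bool:
--     """Check if location is in the US"""
--     if not location:
--         return False
--     s = location.lower()
--     for term in _TERMS:
--         if term in s:
--             return True
--     # the 50 ", xx" state indicators: one scan for ", " followed by a code in the set
--     for i in range(len(s) - 3):
--         if s[i] == ',' and s[i + 1] == ' ' and s[i + 2:i + 4] in _STATES:
--             return True
--     return False
-- ===== Notes on version B (the rewrite author's own statement) =====
-- stated objective: alternative
-- what changed: A runs one substring scan per indicator over all ~70 indicators; B checks only the 17 word-like terms by substring and replaces the 50 comma-space-state-code indicators by a single left-to-right scan of the lowered string that matches a comma, a space, and then two letters looked up in a 50-element frozenset.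
import Mathlib
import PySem

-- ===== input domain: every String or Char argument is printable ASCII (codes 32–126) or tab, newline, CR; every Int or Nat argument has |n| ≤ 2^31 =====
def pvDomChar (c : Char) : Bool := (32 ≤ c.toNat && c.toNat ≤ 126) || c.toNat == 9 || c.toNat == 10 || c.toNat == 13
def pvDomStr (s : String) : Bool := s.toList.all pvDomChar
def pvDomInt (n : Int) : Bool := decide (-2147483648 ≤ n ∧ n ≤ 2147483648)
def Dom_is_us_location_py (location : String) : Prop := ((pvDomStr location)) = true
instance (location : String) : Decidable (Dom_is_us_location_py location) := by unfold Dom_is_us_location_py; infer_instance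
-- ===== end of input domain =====

-- B replaces A's uniform 70-substring scan by 17 term checks plus ONE manual scan of the
-- string that looks for ", " followed by a two-letter code in a 50-element state set (alternative decomposition).


-- ===== PORT A =====
def usIndicators : List String :=
  ["united states", "usa", "u.s.", "us",
   ", al", ", ak", ", az", ", ar", ", ca", ", co", ", ct", ", de", ", fl", ", ga",
   ", hi", ", id", ", il", ", in", ", ia", ", ks", ", ky", ", la", ", me", ", md",
   ", ma", ", mi", ", mn", ", ms", ", mo", ", mt", ", ne", ", nv", ", nh", ", nj",
   ", nm", ", ny", ", nc", ", nd", ", oh", ", ok", ", or", ", pa", ", ri", ", sc",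
   ", sd", ", tn", ", tx", ", ut", ", vt", ", va", ", wa", ", wv", ", wi", ", wy",
   "new york", "san francisco", "los angeles", "chicago", "boston", "seattle",
   "austin", "denver", "atlanta", "miami", "dallas", "houston", "phoenix"]

def is_us_location_py (location : String) : Bool :=
  if location.toList.isEmpty then false
  else
    let location_lower := PySem.Str.lower location
    usIndicators.any (fun ind => PySem.Str.isIn ind location_lower)

-- ===== PORT B =====
-- _STATES: the 50 two-letter state codes, as character pairs
def usStates : List (Char × Char) :=
  [('a','l'), ('a','k'), ('a','z'), ('a','r'), ('c','a'), ('c','o'), ('c','t'), ('d','e'), ('f','l'), ('g','a'),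
   ('h','i'), ('i','d'), ('i','l'), ('i','n'), ('i','a'), ('k','s'), ('k','y'), ('l','a'), ('m','e'), ('m','d'),
   ('m','a'), ('m','i'), ('m','n'), ('m','s'), ('m','o'), ('m','t'), ('n','e'), ('n','v'), ('n','h'), ('n','j'),
   ('n','m'), ('n','y'), ('n','c'), ('n','d'), ('o','h'), ('o','k'), ('o','r'), ('p','a'), ('r','i'), ('s','c'),
   ('s','d'), ('t','n'), ('t','x'), ('u','t'), ('v','t'), ('v','a'), ('w','a'), ('w','v'), ('w','i'), ('w','y')]

-- _TERMS
def usTerms : List String :=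
  ["united states", "usa", "u.s.", "us",
   "new york", "san francisco", "los angeles", "chicago", "boston",
   "seattle", "austin", "denver", "atlanta", "miami", "dallas",
   "houston", "phoenix"]

-- the 'for i in range(len(s)-3)' loop: at each position check ',', ' ', then the next
-- two characters against the state set
def stateScan : List Char → Bool
  | c1 :: c2 :: c3 :: c4 :: rest =>
      (c1 == ',' && c2 == ' ' && usStates.contains (c3, c4)) || stateScan (c2 :: c3 :: c4 :: rest)
  | _ => false

def is_us_location_py_alt (location : String) : Bool :=
  if location.toList.isEmpty then false
  else
    let s := PySem.Str.lower location
    usTerms.any (fun t => PySem.Str.isIn t s) || stateScan s.toList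

-- ===== PRECONDITION & SPEC =====
def Spec_is_us_location_py (location : String) (out : Bool) : Prop := out = is_us_location_py_alt location
instance (location : String) (out : Bool) : Decidable (Spec_is_us_location_py location out) := by unfold Spec_is_us_location_py; infer_instance

-- ===== CLAIM (what is proved, stated in full; the proofs are below) =====
def Claim_equal_is_us_location_py : Prop := ∀ (location : String), Dom_is_us_location_py location → Spec_is_us_location_py location (is_us_location_py location)

-- ===== LEMMAS AND PROOFS =====

-- the 4 generic US terms of A's list
def usTermsHead : List String := ["united states", "usa", "u.s.", "us"]
-- the 13 city names of A's list
def usCities : List String :=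
  ["new york", "san francisco", "los angeles", "chicago", "boston", "seattle",
   "austin", "denver", "atlanta", "miami", "dallas", "houston", "phoenix"]
-- A's 50 state indicators, generated from the code pairs
def stateStrings : List String := usStates.map (fun p => String.ofList [',', ' ', p.1, p.2])

lemma indicators_eq : usIndicators = usTermsHead ++ stateStrings ++ usCities := by decide

lemma terms_eq : usTerms = usTermsHead ++ usCities := by decide

lemma stateStrings_any (l : List Char) :
    stateStrings.any (fun ind => PySem.Chars.isIn ind.toList l)
      = usStates.any (fun p => PySem.Chars.isIn [',', ' ', p.1, p.2] l) := by
  rw [stateStrings, List.any_map]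
  rfl

-- 'sub in s' splits on a cons as: prefix here, or 'in' the tail
lemma isIn_cons (t : List Char) (c : Char) (rest : List Char) :
    PySem.Chars.isIn t (c :: rest) = (t.isPrefixOf (c :: rest) || PySem.Chars.isIn t rest) := by
  apply Bool.eq_iff_iff.mpr
  simp [PySem.Chars.isIn_iff_infix, List.isPrefixOf_iff_prefix, List.infix_cons_iff]

-- the head test of stateScan, written as a match on the tail
def headMatch (c : Char) (t : List Char) : Bool :=
  match t with
  | c2 :: c3 :: c4 :: _ => c == ',' && c2 == ' ' && usStates.contains (c3, c4)
  | _ => false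

lemma scan_cons (c : Char) (t : List Char) :
    stateScan (c :: t) = (headMatch c t || stateScan t) := by
  match t with
  | [] => simp [stateScan, headMatch]
  | [c2] => simp [stateScan, headMatch]
  | [c2, c3] => simp [stateScan, headMatch]
  | c2 :: c3 :: c4 :: r => simp [stateScan, headMatch]

lemma prefix_head (c : Char) (t : List Char) :
    usStates.any (fun p => List.isPrefixOf [',', ' ', p.1, p.2] (c :: t)) = headMatch c t := by
  match t with
  | [] => simp [List.isPrefixOf, headMatch]
  | [c2] => simp [List.isPrefixOf, headMatch]
  | [c2, c3] => simp [List.isPrefixOf, headMatch]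
  | c2 :: c3 :: c4 :: r =>
    apply Bool.eq_iff_iff.mpr
    simp only [headMatch, List.any_eq_true, List.isPrefixOf, Bool.and_eq_true, beq_iff_eq,
      List.contains_eq_mem, decide_eq_true_eq]
    constructor
    · rintro ⟨⟨a, b⟩, hm, h1, h2, h3, h4, -⟩
      simp only at h3 h4
      subst h3; subst h4
      exact ⟨⟨h1.symm, h2.symm⟩, hm⟩
    · rintro ⟨⟨h1, h2⟩, hm⟩
      exact ⟨(c3, c4), hm, h1.symm, h2.symm, rfl, rfl, trivial⟩

lemma stateScan_eq (l : List Char) :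
    stateScan l = usStates.any (fun p => PySem.Chars.isIn [',', ' ', p.1, p.2] l) := by
  induction l with
  | nil => decide
  | cons c t ih =>
    rw [scan_cons, ih, ← prefix_head c t]
    apply Bool.eq_iff_iff.mpr
    simp only [List.any_eq_true, Bool.or_eq_true, isIn_cons]
    constructor
    · rintro (⟨p, hp, h⟩ | ⟨p, hp, h⟩)
      · exact ⟨p, hp, Or.inl h⟩
      · exact ⟨p, hp, Or.inr h⟩
    · rintro ⟨p, hp, h | h⟩
      · exact Or.inl ⟨p, hp, h⟩
      · exact Or.inr ⟨p, hp, h⟩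

-- ===== VERDICT (by name: the statement is the Claim_ definition above) =====
theorem is_us_location_py_spec : Claim_equal_is_us_location_py := by
  intro location _
  unfold Spec_is_us_location_py is_us_location_py is_us_location_py_alt
  by_cases h : location.toList.isEmpty
  · simp [h]
  · simp only [h, Bool.false_eq_true, if_false]
    rw [indicators_eq, terms_eq, stateScan_eq, ← stateStrings_any]
    simp only [List.any_append, PySem.Str.isIn_eq, PySem.Str.toList_lower]
    ac_rfl
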